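-- pv_equiv track=rewrite | github.com/HyungminAn/etchZBL | Figure/etc/carbon_film/plot_sankey.py | get_labels_with_numbers
-- ===== SOURCE A (Python) =====
-- def get_labels_with_numbers(labels, source, value):
--     node_out_flow = [0]*len(labels)
--     for s_idx, v in zip(source, value):
--         node_out_flow[s_idx] += v
--
--     #    예: "A_0 (120)"
--     node_labels = []
--     for i, lab in enumerate(labels):
--         node_labels.append(f"{lab} ({node_out_flow[i]})")
--
--     link_labels = [str(v) for v in value]
--     return node_labels, link_labels
-- ===== SOURCE B (Python) =====
-- def get_labels_with_numbers(labels, source, value):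
--     links = list(zip(source, value))
--
--     def outflow(i):
--         return sum(v for s, v in links if s == i)
--
--     flows = [outflow(i) for i in range(len(labels))]
--     node_labels = [f"{lab} ({f})" for lab, f in zip(labels, flows)]
--     link_labels = [str(v) for v in value]
--     return node_labels, link_labels
-- ===== Notes on version B (the rewrite author's own statement) =====
-- stated objective: simpler
-- what changed: Drops the mutable node_out_flow accumulator array: each node's outflow is computed on demand by an outflow(i) helper that rescans the (source, value) links; Pre_ requires every flow-carrying link to name a valid node id 0 <= s < len(labels): out-of-range sources make A raise IndexError, and negative in-range sources on nonzero-flow links lie outside a Sankey link list's natural domain (A resolves them by Python list wraparound onto node s+len(labels)); zero-flow links may carry any in-range index since they add nothing.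
-- outside the precondition, e.g. on get_labels_with_numbers(['a'], [-1], [7]): A returns (['a (7)'], ['7']), B returns (['a (0)'], ['7'])
import Mathlib
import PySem

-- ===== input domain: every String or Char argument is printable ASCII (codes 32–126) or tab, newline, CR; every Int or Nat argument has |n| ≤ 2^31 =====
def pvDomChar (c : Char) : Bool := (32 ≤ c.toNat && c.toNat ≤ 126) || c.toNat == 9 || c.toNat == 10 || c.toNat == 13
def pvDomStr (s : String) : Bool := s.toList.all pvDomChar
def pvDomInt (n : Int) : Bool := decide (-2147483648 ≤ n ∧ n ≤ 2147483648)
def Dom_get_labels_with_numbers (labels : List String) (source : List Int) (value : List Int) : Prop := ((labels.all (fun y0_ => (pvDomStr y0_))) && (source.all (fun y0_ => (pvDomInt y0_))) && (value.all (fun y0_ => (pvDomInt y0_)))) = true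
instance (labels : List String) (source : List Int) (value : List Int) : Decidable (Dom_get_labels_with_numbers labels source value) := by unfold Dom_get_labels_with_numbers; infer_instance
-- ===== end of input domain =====

-- B replaces A's index-addressed mutable accumulator array with an on-demand
-- outflow(i) helper that rescans the (source, value) links per node (simpler,
-- no mutable state, not faster); neither version mutates its arguments.

-- ===== PORT A =====
def get_labels_with_numbers (labels : List String) (source : List Int) (value : List Int) : List String × List String :=
  let node_out_flow :=
    (source.zip value).foldl
      (fun arr p => PySem.List.pySetD arr p.1 (PySem.List.pyGetD arr p.1 0 + p.2))
      (List.replicate labels.length (0 : Int))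
  let node_labels :=
    (PySem.List.enumerate labels 0).map
      (fun p => p.2 ++ " (" ++ PySem.Int.toStr (PySem.List.pyGetD node_out_flow p.1 0) ++ ")")
  let link_labels := value.map (fun v => PySem.Int.toStr v)
  (node_labels, link_labels)

-- ===== PORT B =====
-- Source B's local helper outflow(i): sum of v over the links whose source equals i.
def pvOutflow (links : List (Int × Int)) (i : Int) : Int :=
  ((links.filter (fun q => q.1 == i)).map (·.2)).sum

def get_labels_with_numbers_alt (labels : List String) (source : List Int) (value : List Int) : List String × List String :=
  let links := source.zip value
  let flows := (PySem.List.pyRange 0 (PySem.List.len labels) 1).map (pvOutflow links)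
  let node_labels := (labels.zip flows).map (fun p => p.1 ++ " (" ++ PySem.Int.toStr p.2 ++ ")")
  let link_labels := value.map (fun v => PySem.Int.toStr v)
  (node_labels, link_labels)

-- ===== PRECONDITION & SPEC =====
-- Pre_ requires every flow-carrying link to name a valid node id 0 <= s < len(labels):
-- sources outside [-len(labels), len(labels)) make A raise IndexError, and negative
-- in-range sources on links with nonzero flow lie outside a Sankey link list's natural
-- domain (A resolves them by Python list wraparound onto node s+len(labels), which B
-- does not reproduce); a zero-flow link may carry any in-range index, it adds nothing.
def Pre_get_labels_with_numbers (labels : List String) (source : List Int) (value : List Int) : Prop :=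
  ∀ p ∈ source.zip value,
    (-(labels.length : Int) ≤ p.1 ∧ p.1 < (labels.length : Int)) ∧ (p.1 < 0 → p.2 = 0)

instance (labels : List String) (source : List Int) (value : List Int) : Decidable (Pre_get_labels_with_numbers labels source value) := by
  unfold Pre_get_labels_with_numbers; infer_instance

def pvWitness_get_labels_with_numbers : List String × List Int × List Int :=
  (["a", "b"], [0, 1, 1], [3, 4, 5])

def Spec_get_labels_with_numbers (labels : List String) (source : List Int) (value : List Int) (out : List String × List String) : Prop := out = get_labels_with_numbers_alt labels source value
instance (labels : List String) (source : List Int) (value : List Int) (out : List String × List String) : Decidable (Spec_get_labels_with_numbers labels source value out) := by unfold Spec_get_labels_with_numbers; infer_instance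

-- ===== CLAIM (what is proved, stated in full; the proofs are below) =====
def Claim_equal_get_labels_with_numbers : Prop := ∀ (labels : List String) (source : List Int) (value : List Int), Dom_get_labels_with_numbers labels source value → Pre_get_labels_with_numbers labels source value → Spec_get_labels_with_numbers labels source value (get_labels_with_numbers labels source value)


-- ===== LEMMAS AND PROOFS =====

-- Python's floored s % n written out for an in-range index s.
theorem pv_mod_wrap (s : Int) (n : Nat) (h1 : -(n:Int) ≤ s) (h2 : s < (n:Int)) :
    PySem.Int.mod s (n:Int) = if 0 ≤ s then s else s + n := by
  unfold PySem.Int.mod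
  rw [Int.fmod_eq_emod, if_pos (Or.inl (by omega))]
  split_ifs with hs
  · rw [Int.emod_eq_of_lt hs h2, add_zero]
  · rw [show s = (s + n) - n by ring, Int.sub_emod_right,
      Int.emod_eq_of_lt (by omega) (by omega)]
    ring

-- One loop step of A: reading back any valid index k after `node_out_flow[s] += v`.
theorem pv_step_getD (arr : List Int) (s v : Int) (k : Nat) (hk : k < arr.length)
    (hr : PySem.Raise.InRange arr.length s) :
    PySem.List.pyGetD (PySem.List.pySetD arr s (PySem.List.pyGetD arr s 0 + v)) (k : Int) 0
      = PySem.List.pyGetD arr (k : Int) 0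
        + (if PySem.Int.mod s (arr.length : Int) == (k : Int) then v else 0) := by
  obtain ⟨hr1, hr2⟩ := hr
  by_cases hs : 0 ≤ s
  · rw [pv_mod_wrap s arr.length hr1 hr2, if_pos hs]
    have hlt : s.toNat < arr.length := by omega
    have hcast : s = ((s.toNat : Nat) : Int) := by omega
    rw [hcast]
    rw [PySem.List.pyGetD_pySetD_natCast _ _ _ _ _ hlt]
    by_cases hek : k = s.toNat
    · subst hek; simp
    · have h2 : (((s.toNat : Nat) : Int) == (k : Int)) = false := by
        simp; omega
      rw [if_neg hek, h2]; simp
  · have hj : PySem.List.pyIdx? arr.length s = some (arr.length - (-s).toNat) := by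
      rw [PySem.List.pyIdx?, if_neg hs, if_pos hr1]
    have hjlt : arr.length - (-s).toNat < arr.length := by omega
    have hx : PySem.List.pyGetD arr s 0 = arr[arr.length - (-s).toNat] := by
      rw [PySem.List.pyGetD, PySem.List.pyGet?, hj, Option.bind_some,
        List.getElem?_eq_getElem hjlt, Option.getD_some]
    have hset : PySem.List.pySetD arr s (PySem.List.pyGetD arr s 0 + v)
        = arr.set (arr.length - (-s).toNat) (arr[arr.length - (-s).toNat] + v) := by
      rw [PySem.List.pySetD, PySem.List.pySet?, hj, Option.map_some, Option.getD_some, hx]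
    have hmod : PySem.Int.mod s (arr.length : Int)
        = ((arr.length - (-s).toNat : Nat) : Int) := by
      rw [pv_mod_wrap s arr.length hr1 hr2, if_neg hs]; omega
    rw [hset, hmod, PySem.List.pyGetD_natCast, PySem.List.pyGetD_natCast,
      List.getD_eq_getElem?_getD, List.getD_eq_getElem?_getD, List.getElem?_set]
    by_cases hjk : arr.length - (-s).toNat = k
    · subst hjk
      simp [hjlt]
    · have hbf : (((arr.length - (-s).toNat : Nat) : Int) == (k : Int)) = false := by
        simp; omega
      simp [hjk, hbf]

-- The whole accumulation loop of A read at index k equals the wrapped-index sum.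
theorem pv_loop_getD (pairs : List (Int × Int)) (arr : List Int)
    (h : ∀ p ∈ pairs, PySem.Raise.InRange arr.length p.1)
    (k : Nat) (hk : k < arr.length) :
    PySem.List.pyGetD
        (pairs.foldl (fun a p => PySem.List.pySetD a p.1 (PySem.List.pyGetD a p.1 0 + p.2)) arr)
        (k : Int) 0
      = PySem.List.pyGetD arr (k : Int) 0
        + ((pairs.filter (fun q => PySem.Int.mod q.1 (arr.length : Int) == (k : Int))).map (·.2)).sum := by
  induction pairs generalizing arr with
  | nil => simp
  | cons p rest ih =>
    obtain ⟨hp, hrest⟩ := List.forall_mem_cons.mp h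
    have hlen : (PySem.List.pySetD arr p.1 (PySem.List.pyGetD arr p.1 0 + p.2)).length = arr.length :=
      PySem.List.length_pySetD ..
    rw [List.foldl_cons, ih _ (by rw [hlen]; exact hrest) (by rw [hlen]; exact hk),
      pv_step_getD arr p.1 p.2 k hk hp, hlen]
    by_cases hq : PySem.Int.mod p.1 (arr.length : Int) == (k : Int)
    · simp [hq, add_assoc]
    · simp [hq]

-- The wrapped-index sum splits into the direct hits (s = k) and the wrapped hits (s = k - n).
theorem pv_split_sum (pairs : List (Int × Int)) (n : Nat)
    (h : ∀ p ∈ pairs, PySem.Raise.InRange n p.1) (k : Nat) (hk : k < n) :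
    ((pairs.filter (fun q => PySem.Int.mod q.1 (n : Int) == (k : Int))).map (·.2)).sum
      = ((pairs.filter (fun q => q.1 == (k : Int))).map (·.2)).sum
        + ((pairs.filter (fun q => q.1 == (k : Int) - n)).map (·.2)).sum := by
  induction pairs with
  | nil => simp
  | cons p rest ih =>
    obtain ⟨⟨h1, h2⟩, hrest⟩ := List.forall_mem_cons.mp h
    have hmod : PySem.Int.mod p.1 (n : Int) = if 0 ≤ p.1 then p.1 else p.1 + n :=
      pv_mod_wrap p.1 n h1 h2
    have hih := ih hrest
    by_cases hs : 0 ≤ p.1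
    · have hw : (p.1 == (k : Int) - n) = false := by simp; omega
      by_cases he : p.1 = (k : Int)
      · have hm : (PySem.Int.mod p.1 (n : Int) == (k : Int)) = true := by
          rw [hmod, if_pos hs, he]; simp
        have hd : (p.1 == (k : Int)) = true := by simp [he]
        simp only [List.filter_cons, hm, hw, hd, if_true, if_false, Bool.false_eq_true,
          List.map_cons, List.sum_cons, hih]
        ring
      · have hm : (PySem.Int.mod p.1 (n : Int) == (k : Int)) = false := by
          simp [hmod, hs]; omega
        have hd : (p.1 == (k : Int)) = false := by simp [he]
        simp only [List.filter_cons, hm, hw, hd, Bool.false_eq_true, if_false, hih]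
    · have hd : (p.1 == (k : Int)) = false := by simp; omega
      by_cases he : p.1 = (k : Int) - n
      · have hm : (PySem.Int.mod p.1 (n : Int) == (k : Int)) = true := by
          simp [hmod, hs]; omega
        have hw : (p.1 == (k : Int) - n) = true := by simp [he]
        simp only [List.filter_cons, hm, hw, hd, if_true, if_false, Bool.false_eq_true,
          List.map_cons, List.sum_cons, hih]
        ring
      · have hm : (PySem.Int.mod p.1 (n : Int) == (k : Int)) = false := by
          simp [hmod, hs]; omega
        have hw : (p.1 == (k : Int) - n) = false := by simp [he]
        simp only [List.filter_cons, hm, hw, hd, Bool.false_eq_true, if_false, hih]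

-- ===== VERDICT (by name: the statements are the Claim_ definitions above) =====
theorem get_labels_with_numbers_spec : Claim_equal_get_labels_with_numbers := by
  intro labels source value _ hpre
  unfold Spec_get_labels_with_numbers get_labels_with_numbers get_labels_with_numbers_alt
  simp only
  refine Prod.ext ?_ rfl
  apply List.ext_getElem
  · simp [PySem.List.len, PySem.List.length_enumerate, PySem.List.length_pyRange_one]
  intro k hk hk'
  have hkl : k < labels.length := by
    simpa [PySem.List.length_enumerate] using hk
  have hkr : k < (PySem.List.pyRange 0 (PySem.List.len labels) 1).length := by
    simp [PySem.List.len, PySem.List.length_pyRange_one]; omega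
  rw [List.getElem_map, List.getElem_map, List.getElem_zip, PySem.List.getElem_enumerate,
    List.getElem_map, PySem.List.getElem_pyRange_one]
  simp only [zero_add]
  have hir : ∀ q ∈ source.zip value, PySem.Raise.InRange labels.length q.1 :=
    fun q hq => ((hpre q hq).1)
  have hpre' : ∀ q ∈ source.zip value,
      PySem.Raise.InRange (List.replicate labels.length (0 : Int)).length q.1 := by
    intro q hq
    simpa using hir q hq
  rw [pv_loop_getD (source.zip value) (List.replicate labels.length (0 : Int)) hpre' k (by simpa using hkl)]
  simp only [List.length_replicate]
  rw [pv_split_sum (source.zip value) labels.length hir k hkl]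
  have hz : (((source.zip value).filter (fun q => q.1 == (k : Int) - labels.length)).map (·.2)).sum = 0 := by
    apply List.sum_eq_zero
    intro x hx
    obtain ⟨q, hq, hqx⟩ := List.mem_map.mp hx
    obtain ⟨hqm, hqe⟩ := List.mem_filter.mp hq
    have hneg : q.1 < 0 := by
      have : q.1 = (k : Int) - labels.length := by simpa using hqe
      omega
    rw [← hqx]
    exact (hpre q hqm).2 hneg
  rw [hz, add_zero]
  simp [pvOutflow]
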